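-- pv_equiv track=rewrite | github.com/FDio/vpp | test/test_flowperpkt.py | compare_with_mask
-- ===== SOURCE A (Python) =====
-- def compare_with_mask(payload, masked_expected_data):
--     if len(payload) * 2 != len(masked_expected_data):
--         return False
--
--     # iterate over pairs: raw byte from payload and ASCII code for that
--     # byte from masked payload (or XX if masked)
--     for i in range(len(payload)):
--         p = payload[i]
--         m = masked_expected_data[2 * i:2 * i + 2]
--         if m != "XX":
--             if "%02x" % ord(p) != m:
--                 return False
--     return True
-- ===== SOURCE B (Python) =====
-- def compare_with_mask(payload, masked_expected_data):
--     # Build the full hex rendering of the payload once, apply the mask to it,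
--     # and compare the masked actual string against the expectation in one shot.
--     actual = ''.join('%02x' % ord(c) for c in payload)
--     if len(actual) != len(masked_expected_data):
--         return False
--     masked_actual = ''.join(
--         'XX' if masked_expected_data[i:i + 2] == 'XX' else actual[i:i + 2]
--         for i in range(0, len(actual), 2))
--     return masked_actual == masked_expected_data
-- ===== Notes on version B (the rewrite author's own statement) =====
-- stated objective: idiomatic
-- what changed: B renders the whole payload to its hex string once, overwrites the masked pairs onto it, and decides by a single string equality, instead of A's per-index slice-and-compare loop with early return.
import Mathlib
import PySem

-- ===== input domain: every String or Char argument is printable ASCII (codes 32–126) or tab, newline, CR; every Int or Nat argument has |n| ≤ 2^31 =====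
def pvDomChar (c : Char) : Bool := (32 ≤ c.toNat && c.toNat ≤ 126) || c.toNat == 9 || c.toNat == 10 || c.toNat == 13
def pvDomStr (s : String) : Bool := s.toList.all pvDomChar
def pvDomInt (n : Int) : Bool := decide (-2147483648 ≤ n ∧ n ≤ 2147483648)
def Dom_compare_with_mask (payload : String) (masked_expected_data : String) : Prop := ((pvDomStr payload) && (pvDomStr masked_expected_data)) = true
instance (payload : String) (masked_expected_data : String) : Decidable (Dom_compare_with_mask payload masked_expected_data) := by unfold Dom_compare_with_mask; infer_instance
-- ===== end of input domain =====

-- B builds the payload's full hex string once, overwrites the masked pairs onto it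
-- and decides by one string equality, instead of A's per-index slice/compare loop.

-- shared helper: Python's "%02x" % n, exact for 0 ≤ n < 256 (Dom bounds chars to ≤ 126)
def pvHexDigit (n : Nat) : Char :=
  if n < 10 then Char.ofNat (48 + n) else Char.ofNat (87 + n)

def pvHex2 (n : Nat) : List Char :=
  [pvHexDigit (n / 16 % 16), pvHexDigit (n % 16)]

-- ===== PORT A =====
-- the for-loop over range(len(payload)); 'none' branch is unreachable (i < len)
def cwmLoop (pl ml : List Char) : List Int → Bool
  | [] => true
  | i :: rest =>
    match PySem.List.pyGet? pl i with
    | none => false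
    | some p =>
      let m := PySem.List.slice ml (some (2 * i)) (some (2 * i + 2))
      if m ≠ ['X', 'X'] then
        if pvHex2 p.toNat ≠ m then false else cwmLoop pl ml rest
      else cwmLoop pl ml rest

def compare_with_mask (payload : String) (masked_expected_data : String) : Bool :=
  if payload.toList.length * 2 ≠ masked_expected_data.toList.length then false
  else cwmLoop payload.toList masked_expected_data.toList
    (PySem.List.pyRange 0 payload.toList.length 1)

-- ===== PORT B =====
-- actual = ''.join('%02x' % ord(c) for c in payload)
def pvHexJoin (pl : List Char) : List Char := pl.flatMap (fun c => pvHex2 c.toNat)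

-- ''.join('XX' if masked pair == 'XX' else actual pair, walking both strings two chars at a time)
def pvMaskPairs : List Char → List Char → List Char
  | m1 :: m2 :: m', a1 :: a2 :: a' =>
    (if m1 = 'X' ∧ m2 = 'X' then ['X', 'X'] else [a1, a2]) ++ pvMaskPairs m' a'
  | _, _ => []

def compare_with_mask_alt (payload : String) (masked_expected_data : String) : Bool :=
  if (pvHexJoin payload.toList).length ≠ masked_expected_data.toList.length then false
  else pvMaskPairs masked_expected_data.toList (pvHexJoin payload.toList) == masked_expected_data.toList

-- ===== PRECONDITION & SPEC =====
def Spec_compare_with_mask (payload : String) (masked_expected_data : String) (out : Bool) : Prop := out = compare_with_mask_alt payload masked_expected_data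
instance (payload : String) (masked_expected_data : String) (out : Bool) : Decidable (Spec_compare_with_mask payload masked_expected_data out) := by unfold Spec_compare_with_mask; infer_instance

-- ===== CLAIM (what is proved, stated in full; the proofs are below) =====
def Claim_equal_compare_with_mask : Prop := ∀ (payload : String) (masked_expected_data : String), Dom_compare_with_mask payload masked_expected_data → Spec_compare_with_mask payload masked_expected_data (compare_with_mask payload masked_expected_data)

-- ===== LEMMAS AND PROOFS =====

-- A's loop, rephrased as a pair-at-a-time recursion (proof-side abstraction)
def pairLoopA : List Char → List Char → Bool
  | [], _ => true
  | p :: pl, ml =>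
    match ml with
    | m1 :: m2 :: ml' =>
      if [m1, m2] ≠ ['X', 'X'] then
        if pvHex2 p.toNat ≠ [m1, m2] then false else pairLoopA pl ml'
      else pairLoopA pl ml'
    | _ => true

theorem length_pvHexJoin (pl : List Char) : (pvHexJoin pl).length = 2 * pl.length := by
  induction pl with
  | nil => rfl
  | cons p pl ih => simp [pvHexJoin, pvHex2, List.flatMap_cons] at *; omega

theorem cwmLoop_eq_pairLoopA (pl ml : List Char) (h : ml.length = 2 * pl.length) :
    ∀ k : Nat, k ≤ pl.length →
      cwmLoop pl ml (PySem.List.pyRange (k : Int) (pl.length : Int) 1) =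
        pairLoopA (pl.drop k) (ml.drop (2 * k)) := by
  intro k hk
  induction hn : pl.length - k generalizing k with
  | zero =>
    have hk' : k = pl.length := by omega
    subst hk'
    have : PySem.List.pyRange (pl.length : Int) (pl.length : Int) 1 = [] := by
      simp
    rw [this]
    have h1 : pl.drop pl.length = [] := by simp
    have h2 : ml.drop (2 * pl.length) = [] := by
      apply List.drop_eq_nil_of_le; omega
    rw [h1, h2]; rfl
  | succ n ih =>
    have hlt : k < pl.length := by omega
    have hcons : PySem.List.pyRange (k : Int) (pl.length : Int) 1 =
        (k : Int) :: PySem.List.pyRange ((k : Int) + 1) (pl.length : Int) 1 := by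
      apply PySem.List.pyRange_one_cons; exact_mod_cast hlt
    rw [hcons]
    have hget : PySem.List.pyGet? pl (k : Int) = some pl[k] := by
      simp [PySem.List.pyGet?_natCast, List.getElem?_eq_getElem hlt]
    have h2k : 2 * k + 1 < ml.length := by omega
    have hslice : PySem.List.slice ml (some (2 * (k : Int))) (some (2 * (k : Int) + 2)) =
        (ml.drop (2 * k)).take 2 := by
      have := PySem.List.slice_natCast_add ml (2 * k) 2
      push_cast at this ⊢
      simpa using this
    have hdropml : ml.drop (2 * k) = ml[2 * k] :: ml[2 * k + 1] :: ml.drop (2 * k + 2) := by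
      rw [List.drop_eq_getElem_cons (by omega)]
      congr 1
      rw [List.drop_eq_getElem_cons (by omega)]
    have hdroppl : pl.drop k = pl[k] :: pl.drop (k + 1) := List.drop_eq_getElem_cons hlt
    have hrec : cwmLoop pl ml (PySem.List.pyRange ((k : Int) + 1) (pl.length : Int) 1) =
        pairLoopA (pl.drop (k + 1)) (ml.drop (2 * (k + 1))) := by
      have := ih (k + 1) (by omega) (by omega)
      push_cast at this
      exact this
    have hslice2 : PySem.List.slice ml (some (2 * (k : Int))) (some (2 * (k : Int) + 2)) =
        [ml[2 * k], ml[2 * k + 1]] := by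
      rw [hslice, hdropml]; rfl
    have h22 : 2 * (k + 1) = 2 * k + 2 := by omega
    rw [h22] at hrec
    rw [hdroppl, hdropml]
    simp only [cwmLoop, hget, hslice2, pairLoopA]
    split_ifs <;> first | rfl | exact hrec

theorem pairLoopA_eq_maskPairs (pl ml : List Char) (h : ml.length = 2 * pl.length) :
    pairLoopA pl ml = (pvMaskPairs ml (pvHexJoin pl) == ml) := by
  induction pl generalizing ml with
  | nil =>
    have : ml = [] := by simpa [List.length_eq_zero_iff] using h
    subst this; rfl
  | cons p pl ih =>
    match ml, h with
    | m1 :: m2 :: ml', h =>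
      have h' : ml'.length = 2 * pl.length := by simp at h; omega
      have hjoin : pvHexJoin (p :: pl) =
          pvHexDigit (p.toNat / 16 % 16) :: pvHexDigit (p.toNat % 16) :: pvHexJoin pl := by
        simp [pvHexJoin, pvHex2, List.flatMap_cons]
      rw [hjoin]
      simp only [pairLoopA, pvMaskPairs]
      by_cases hXX : m1 = 'X' ∧ m2 = 'X'
      · obtain ⟨h1, h2⟩ := hXX
        subst h1; subst h2
        simp [ih ml' h']
      · have hne : [m1, m2] ≠ ['X', 'X'] := by
          intro hc; apply hXX; injection hc with e1 e2; injection e2 with e2 _; exact ⟨e1, e2⟩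
        rw [if_neg hXX]
        by_cases hh : pvHex2 p.toNat ≠ [m1, m2]
        · rw [if_pos hh]
          have hd : pvHexDigit (p.toNat / 16 % 16) ≠ m1 ∨ pvHexDigit (p.toNat % 16) ≠ m2 := by
            by_contra hc
            push Not at hc
            exact hh (by simp [pvHex2, hc.1, hc.2])
          have hx : ¬ m1 = 'X' ∨ ¬ m2 = 'X' := by tauto
          rcases hd with hc | hc <;> rcases hx with hx | hx <;> simp [hc, hx]
        · rw [if_neg hh]
          push Not at hh
          have e1 : pvHexDigit (p.toNat / 16 % 16) = m1 := by
            have := congrArg (·.headI) hh; simpa [pvHex2] using this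
          have e2 : pvHexDigit (p.toNat % 16) = m2 := by
            have := congrArg (·.tail.headI) hh; simpa [pvHex2] using this
          simp [e1, e2, ih ml' h']

-- ===== VERDICT (by name: the statement is the Claim_ definition above) =====
theorem compare_with_mask_spec : Claim_equal_compare_with_mask := by
  intro payload masked _
  unfold Spec_compare_with_mask compare_with_mask compare_with_mask_alt
  generalize payload.toList = pl
  generalize masked.toList = ml
  rw [length_pvHexJoin]
  by_cases hlen : pl.length * 2 = ml.length
  · have hlen' : ml.length = 2 * pl.length := by omega
    rw [if_neg (by omega), if_neg (by omega)]
    have := cwmLoop_eq_pairLoopA pl ml hlen' 0 (by omega)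
    simp only [Nat.cast_zero, Nat.mul_zero, List.drop_zero] at this
    rw [this, pairLoopA_eq_maskPairs pl ml hlen']
  · rw [if_pos (by omega), if_pos (by omega)]
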